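-- pv_equiv track=rewrite | github.com/ekampannu77/school-transport-system | scripts/import-satnam-students.py | convert_class
-- ===== SOURCE A (Python) =====
-- ROMAN_TO_NUM = {
--     'I': '1', 'II': '2', 'III': '3', 'IV': '4', 'V': '5',
--     'VI': '6', 'VII': '7', 'VIII': '8', 'IX': '9', 'X': '10',
--     'XI': '11', 'XII': '12'
-- }
--
-- def convert_class(class_str):
--     """Convert class with roman numerals to standard format"""
--     if not class_str or class_str == 'nan':
--         return 'Unknown'
--
--     class_str = str(class_str).strip()
--
--     # Handle special classes
--     if 'UKG' in class_str.upper():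
--         return 'UKG'
--     if 'LKG' in class_str.upper():
--         return 'LKG'
--
--     # Convert roman numerals
--     for roman, num in ROMAN_TO_NUM.items():
--         if class_str.startswith(roman + ' '):
--             # Replace roman with number
--             class_str = class_str.replace(roman + ' ', f'Class {num}-', 1)
--             return class_str
--
--     # If no roman numeral, return as is
--     if not class_str.startswith('Class'):
--         return class_str
--     return class_str
-- ===== SOURCE B (Python) =====
-- ROMAN_TO_NUM = {
--     'I': '1', 'II': '2', 'III': '3', 'IV': '4', 'V': '5',
--     'VI': '6', 'VII': '7', 'VIII': '8', 'IX': '9', 'X': '10',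
--     'XI': '11', 'XII': '12'
-- }
--
-- def convert_class(class_str):
--     """Convert class with roman numerals to standard format"""
--     if not class_str or class_str == 'nan':
--         return 'Unknown'
--
--     class_str = str(class_str).strip()
--
--     upper = class_str.upper()
--     if 'UKG' in upper:
--         return 'UKG'
--     if 'LKG' in upper:
--         return 'LKG'
--
--     # A leading roman numeral is exactly the word before the first space:
--     # split once and look it up directly instead of scanning all 12 prefixes.
--     token, sep, rest = class_str.partition(' ')
--     if sep:
--         num = ROMAN_TO_NUM.get(token)
--         if num is not None:
--             return f'Class {num}-{rest}'
--
--     return class_str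
-- ===== Notes on version B (the rewrite author's own statement) =====
-- stated objective: idiomatic
-- what changed: Instead of scanning all 12 roman prefixes with startswith and replace(...,1), B splits the class string once at the first space with str.partition and looks the first word up directly in ROMAN_TO_NUM.
import Mathlib
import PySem

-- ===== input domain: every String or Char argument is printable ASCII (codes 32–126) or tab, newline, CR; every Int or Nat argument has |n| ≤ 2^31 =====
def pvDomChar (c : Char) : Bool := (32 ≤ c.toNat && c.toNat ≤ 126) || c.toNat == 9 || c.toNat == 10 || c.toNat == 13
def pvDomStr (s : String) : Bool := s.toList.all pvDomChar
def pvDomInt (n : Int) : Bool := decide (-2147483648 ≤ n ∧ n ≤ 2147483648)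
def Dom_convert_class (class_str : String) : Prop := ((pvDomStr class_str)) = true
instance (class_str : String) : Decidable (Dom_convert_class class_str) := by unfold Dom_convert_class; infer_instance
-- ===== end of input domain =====

-- B replaces A's scan over all 12 roman prefixes by one split at the first space and a direct
-- dictionary lookup of that first word (objective: idiomatic; same guards, same results).

-- ===== PORT A =====
-- module constant ROMAN_TO_NUM, as its ordered (key, value) pairs
def romanPairs : List (List Char × List Char) :=
  [("I".toList, "1".toList), ("II".toList, "2".toList), ("III".toList, "3".toList),
   ("IV".toList, "4".toList), ("V".toList, "5".toList), ("VI".toList, "6".toList),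
   ("VII".toList, "7".toList), ("VIII".toList, "8".toList), ("IX".toList, "9".toList),
   ("X".toList, "10".toList), ("XI".toList, "11".toList), ("XII".toList, "12".toList)]

-- hand port of s.replace(old, new, 1): replace only the FIRST occurrence (exact; Chars.find is
-- Python's s.find, and Python replaces at the first occurrence site)
def replaceOnce (s old new : List Char) : List Char :=
  let i := PySem.Chars.find s old
  if i < 0 then s else s.take i.toNat ++ new ++ s.drop (i.toNat + old.length)

-- A's 'for roman, num in ROMAN_TO_NUM.items(): …' loop, then the trailing no-op 'Class' check
def convertLoop : List (List Char × List Char) → List Char → List Char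
  | [], s => if ¬ (PySem.Chars.startswith s "Class".toList) then s else s
  | (r, n) :: rest, s =>
      if PySem.Chars.startswith s (r ++ [' ']) then
        replaceOnce s (r ++ [' ']) ("Class ".toList ++ n ++ "-".toList)
      else convertLoop rest s

def convert_class (class_str : String) : String :=
  if class_str = "" || class_str = "nan" then "Unknown"
  else
    let t := PySem.Chars.strip class_str.toList
    if PySem.Chars.isIn "UKG".toList (PySem.Chars.upper t) then "UKG"
    else if PySem.Chars.isIn "LKG".toList (PySem.Chars.upper t) then "LKG"
    else String.mk (convertLoop romanPairs t)

-- ===== PORT B =====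
-- ROMAN_TO_NUM as the dict B looks the first word up in
def romanDict : PySem.Dict (List Char) (List Char) := PySem.Dict.mk romanPairs

def convert_class_alt (class_str : String) : String :=
  if class_str = "" || class_str = "nan" then "Unknown"
  else
    let t := PySem.Chars.strip class_str.toList
    let u := PySem.Chars.upper t
    if PySem.Chars.isIn "UKG".toList u then "UKG"
    else if PySem.Chars.isIn "LKG".toList u then "LKG"
    else
      -- hand port of class_str.partition(' '): split at the first space (exact: the separator
      -- is a fixed nonempty string and Chars.find is Python's str.find)
      let i := PySem.Chars.find t [' ']
      if i = -1 then String.mk t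
      else
        match PySem.Dict.get? romanDict (t.take i.toNat) with
        | some n => String.mk ("Class ".toList ++ n ++ "-".toList ++ t.drop (i.toNat + 1))
        | none => String.mk t

-- ===== PRECONDITION & SPEC =====
def Spec_convert_class (class_str : String) (out : String) : Prop := out = convert_class_alt class_str
instance (class_str : String) (out : String) : Decidable (Spec_convert_class class_str out) := by unfold Spec_convert_class; infer_instance

-- ===== CLAIM (what is proved, stated in full; the proofs are below) =====
def Claim_equal_convert_class : Prop := ∀ (class_str : String), Dom_convert_class class_str → Spec_convert_class class_str (convert_class class_str)

-- ===== LEMMAS AND PROOFS =====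

lemma singleton_prefix_iff (c : Char) (xs : List Char) : [c] <+: xs ↔ xs[0]? = some c := by
  cases xs <;> simp [List.cons_prefix_cons, eq_comm]

lemma space_prefix_drop (l : List Char) (i : Nat) :
    ([' '] <+: l.drop i) ↔ l[i]? = some ' ' := by
  rw [singleton_prefix_iff, ← List.head?_eq_getElem?, List.head?_drop]

-- A roman prefix 'r + " "' matches iff the word before the first space is exactly r.
lemma startswith_roman_iff (l r : List Char) (hr : ' ' ∉ r)
    (hfind : 0 ≤ PySem.Chars.find l [' ']) :
    PySem.Chars.startswith l (r ++ [' ']) = true ↔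
      l.take (PySem.Chars.find l [' ']).toNat = r := by
  obtain ⟨h1, h2⟩ := PySem.Chars.find_spec hfind
  set k := (PySem.Chars.find l [' ']).toNat with hk
  rw [space_prefix_drop] at h1
  constructor
  · intro hs
    rw [PySem.Chars.startswith_iff] at hs
    obtain ⟨s, hs⟩ := hs
    rw [List.append_assoc] at hs
    have hlen : k = r.length := by
      rcases Nat.lt_trichotomy k r.length with h | h | h
      · exfalso
        rw [← hs, List.getElem?_append_left h] at h1
        have : r[k] = ' ' := by
          have := (List.getElem?_eq_some_iff.mp h1).2; simpa using this
        exact hr (this ▸ List.getElem_mem _)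
      · exact h
      · exfalso
        apply h2 r.length h
        rw [space_prefix_drop, ← hs, List.getElem?_append_right (le_refl _)]
        simp
    rw [hlen, ← hs, List.take_left]
  · intro ht
    have hklen : k < l.length := (List.getElem?_eq_some_iff.mp h1).1
    rw [PySem.Chars.startswith_iff]
    have hdrop : l.drop k = ' ' :: l.drop (k + 1) := by
      rw [List.drop_eq_getElem_cons hklen]
      have : l[k] = ' ' := by
        have := (List.getElem?_eq_some_iff.mp h1).2; simpa using this
      rw [this]
    refine ⟨l.drop (k + 1), ?_⟩
    rw [List.append_assoc]
    conv_rhs => rw [← List.take_append_drop k l, ht, hdrop]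
    rfl

lemma replaceOnce_of_startswith (l old new : List Char)
    (h : PySem.Chars.startswith l old = true) :
    replaceOnce l old new = new ++ l.drop old.length := by
  rw [PySem.Chars.startswith_iff] at h
  have h0 : 0 ≤ PySem.Chars.find l old :=
    (PySem.Chars.find_nonneg_iff l old).mpr h.isInfix
  have hz : PySem.Chars.find l old = 0 := by
    by_contra hne
    have hpos : 0 < (PySem.Chars.find l old).toNat := by omega
    exact ((PySem.Chars.find_spec h0).2 0 hpos) (by simpa using h)
  simp [replaceOnce, hz]

lemma convertLoop_of_all_false (pairs : List (List Char × List Char)) (l : List Char)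
    (h : ∀ p ∈ pairs, PySem.Chars.startswith l (p.1 ++ [' ']) = false) :
    convertLoop pairs l = l := by
  induction pairs with
  | nil => unfold convertLoop; split <;> rfl
  | cons p rest ih =>
    obtain ⟨r, n⟩ := p
    unfold convertLoop
    rw [h (r, n) (List.mem_cons_self)]
    exact ih (fun q hq => h q (List.mem_cons_of_mem _ hq))
    
lemma convertLoop_eq_lookup (pairs : List (List Char × List Char)) (l : List Char)
    (hks : ∀ p ∈ pairs, ' ' ∉ p.1)
    (hfind : 0 ≤ PySem.Chars.find l [' ']) :
    convertLoop pairs l =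
      match (PySem.Dict.mk pairs).get? (l.take (PySem.Chars.find l [' ']).toNat) with
      | some n => "Class ".toList ++ n ++ "-".toList ++ l.drop ((PySem.Chars.find l [' ']).toNat + 1)
      | none => l := by
  set k := (PySem.Chars.find l [' ']).toNat with hk
  induction pairs with
  | nil =>
    simp only [PySem.Dict.get?]
    unfold convertLoop; split <;> rfl
  | cons p rest ih =>
    obtain ⟨r, n⟩ := p
    have hr : ' ' ∉ r := hks (r, n) (List.mem_cons_self)
    rw [PySem.Dict.get?_mk_cons]
    unfold convertLoop
    by_cases ht : l.take k = r
    · have hsw : PySem.Chars.startswith l (r ++ [' ']) = true :=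
        (startswith_roman_iff l r hr hfind).mpr ht
      rw [hsw, if_pos rfl, replaceOnce_of_startswith _ _ _ hsw]
      have hkr : r.length = k := by
        have hklen : k ≤ l.length := by
          have := PySem.Chars.find_le_length l [' ']
          omega
        rw [← ht, List.length_take]; omega
      have : (r == l.take k) = true := by rw [ht]; exact beq_self_eq_true r
      rw [this]
      simp [hkr]
    · have hsw : PySem.Chars.startswith l (r ++ [' ']) = false := by
        rw [← Bool.not_eq_true, startswith_roman_iff l r hr hfind]; exact ht
      have : (r == l.take k) = false := by
        rw [beq_eq_false_iff_ne]; exact fun h => ht h.symm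
      rw [hsw, this, if_neg (by simp)]
      exact ih (fun q hq => hks q (List.mem_cons_of_mem _ hq))

lemma convertLoop_main (l : List Char) :
    convertLoop romanPairs l =
      (if PySem.Chars.find l [' '] = -1 then l
       else
         match PySem.Dict.get? romanDict (l.take (PySem.Chars.find l [' ']).toNat) with
         | some n => "Class ".toList ++ n ++ "-".toList ++ l.drop ((PySem.Chars.find l [' ']).toNat + 1)
         | none => l) := by
  by_cases hneg : PySem.Chars.find l [' '] = -1
  · rw [if_pos hneg]
    apply convertLoop_of_all_false
    intro p hp
    rw [← Bool.not_eq_true, PySem.Chars.startswith_iff]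
    intro hpre
    have hmem : ' ' ∈ l := hpre.subset (by simp)
    obtain ⟨s, t, hst⟩ := List.append_of_mem hmem
    have : [' '] <:+: l := ⟨s, t, by rw [hst]; simp⟩
    rw [PySem.Chars.find_eq_neg_one_iff] at hneg
    exact hneg this
  · have h0 : 0 ≤ PySem.Chars.find l [' '] := by
      have := PySem.Chars.neg_one_le_find l [' ']
      omega
    rw [if_neg hneg]
    exact convertLoop_eq_lookup romanPairs l (by decide) h0

-- ===== VERDICT (by name: the statement is the Claim_ definition above) =====
theorem convert_class_spec : Claim_equal_convert_class := by
  intro class_str _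
  unfold Spec_convert_class convert_class convert_class_alt
  dsimp only
  split
  · rfl
  · split
    · rfl
    · split
      · rfl
      · rw [convertLoop_main]
        split
        · rfl
        · split <;> rfl
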